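-- pv_equiv track=rewrite | github.com/Rainnystone/skill-orchestration-system | src/sos/propose.py | _group_by_family_depth
-- ===== SOURCE A (Python) =====
-- from collections import defaultdict
--
-- def _group_by_family_depth(
--     pack_id: str, skill_names: tuple[str, ...], depth: int
-- ) -> dict[str, tuple[str, ...]]:
--     groups: dict[str, list[str]] = defaultdict(list)
--
--     for skill_name in skill_names:
--         family_key = _family_key(pack_id, skill_name, depth)
--         groups[family_key].append(skill_name)
--
--     return {
--         family_key: tuple(sorted(family_skill_names))
--         for family_key, family_skill_names in groups.items()
--     }
--
-- def _family_key(pack_id: str, skill_name: str, depth: int) -> str: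
--     tokens = _family_tokens(pack_id, skill_name)
--     return "-".join(tokens[: min(depth, len(tokens))])
--
-- def _family_tokens(pack_id: str, skill_name: str) -> tuple[str, ...]:
--     for prefix in _functional_prefixes(pack_id):
--         if skill_name.startswith(prefix):
--             skill_name = skill_name[len(prefix) :]
--             break
--
--     return tuple(token for token in skill_name.split("-") if token)
--
-- def _functional_prefixes(pack_id: str) -> tuple[str, ...]:
--     if pack_id == "game-design":
--         return ("game-",)
--     return (f"{pack_id}-",)
-- ===== SOURCE B (Python) =====
-- def _group_by_family_depth(pack_id, skill_names, depth):
--     pairs = [(_family_key(pack_id, n, depth), n) for n in skill_names]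
--     buckets = {}
--     for k, n in sorted(pairs, key=lambda p: p[1]):
--         buckets.setdefault(k, []).append(n)
--     return {k: tuple(buckets[k]) for k in dict.fromkeys(k for k, _ in pairs)}
--
-- def _family_key(pack_id, skill_name, depth):
--     tokens = _family_tokens(pack_id, skill_name)
--     return "-".join(tokens[: min(depth, len(tokens))])
--
-- def _family_tokens(pack_id, skill_name):
--     for prefix in _functional_prefixes(pack_id):
--         if skill_name.startswith(prefix):
--             skill_name = skill_name[len(prefix):]
--             break
--     return tuple(token for token in skill_name.split("-") if token)
--
-- def _functional_prefixes(pack_id):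
--     if pack_id == "game-design":
--         return ("game-",)
--     return (f"{pack_id}-",)
-- ===== Notes on version B (the rewrite author's own statement) =====
-- stated objective: alternative
-- what changed: A buckets names into a defaultdict in input order and then sorts each group; B sorts the (family_key, name) pairs once globally by name, buckets the sorted stream in a single pass so groups come out already sorted, and restores A's first-appearance key order with dict.fromkeys.
import Mathlib
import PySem

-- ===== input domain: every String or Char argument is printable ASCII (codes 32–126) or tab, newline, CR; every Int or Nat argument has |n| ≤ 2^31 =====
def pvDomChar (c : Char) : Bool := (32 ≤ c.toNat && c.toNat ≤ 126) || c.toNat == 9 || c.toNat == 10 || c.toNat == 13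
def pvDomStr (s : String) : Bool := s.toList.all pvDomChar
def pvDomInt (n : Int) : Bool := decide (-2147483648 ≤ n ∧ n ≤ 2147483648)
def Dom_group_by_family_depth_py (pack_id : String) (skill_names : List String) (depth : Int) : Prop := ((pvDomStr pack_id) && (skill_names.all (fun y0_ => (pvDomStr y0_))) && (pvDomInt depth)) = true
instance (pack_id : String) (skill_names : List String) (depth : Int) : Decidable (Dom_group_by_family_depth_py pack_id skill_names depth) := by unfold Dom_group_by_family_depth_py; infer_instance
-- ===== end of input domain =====

-- B sorts the key/name pairs once by name and buckets them in a single pass (groups come out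
-- already sorted), instead of A's bucket-first-then-sort-each-group; key order is restored by
-- deduplicating the key list (objective: alternative — sort-all-then-group vs group-then-sort-each).


-- ===== PORT A =====
-- shared helpers (identical in Source A and Source B): _functional_prefixes, _family_tokens, _family_key
def functionalPrefixes_py (pack_id : String) : List String :=
  if pack_id == "game-design" then ["game-"]
  else [PySem.Str.join "" [pack_id, "-"]]   -- f"{pack_id}-"

-- the 'for prefix …: if startswith: strip; break' loop of _family_tokens
def stripPrefix_py : List String → String → String
  | [], skill_name => skill_name
  | p :: ps, skill_name =>
      if PySem.Str.startswith skill_name p then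
        PySem.Str.slice skill_name (some (PySem.Str.len p : Int)) none   -- skill_name[len(prefix):]
      else stripPrefix_py ps skill_name

def familyTokens_py (pack_id skill_name : String) : List String :=
  let sn := stripPrefix_py (functionalPrefixes_py pack_id) skill_name
  -- skill_name.split("-"), keeping only truthy (nonempty) tokens; Chars.splitOn is split with a nonempty sep
  ((PySem.Chars.splitOn sn.toList "-".toList).map String.ofList).filter (fun t => !(t == ""))

def familyKey_py (pack_id skill_name : String) (depth : Int) : String :=
  let tokens := familyTokens_py pack_id skill_name
  PySem.Str.join "-" (PySem.List.slice tokens none (some (min depth (tokens.length : Int))))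

def group_by_family_depth_py (pack_id : String) (skill_names : List String) (depth : Int) : List (String × List String) :=
  let groups : PySem.Dict String (List String) :=
    skill_names.foldl (fun d skill_name =>
      d.modify (familyKey_py pack_id skill_name depth) [] (fun g => g ++ [skill_name]))
      PySem.Dict.empty
  groups.items.map (fun p => (p.1, PySem.List.sorted p.2 (fun x => x) false))

-- ===== PORT B =====
def group_by_family_depth_py_alt (pack_id : String) (skill_names : List String) (depth : Int) : List (String × List String) :=
  let pairs := skill_names.map (fun n => (familyKey_py pack_id n depth, n))
  -- for k, n in sorted(pairs, key=lambda p: p[1]): buckets.setdefault(k, []).append(n)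
  let buckets : PySem.Dict String (List String) :=
    (PySem.List.sorted pairs (fun p => p.2) false).foldl
      (fun d p => d.modify p.1 [] (fun g => g ++ [p.2])) PySem.Dict.empty
  -- {k: tuple(buckets[k]) for k in dict.fromkeys(...)}; every such k is a bucket key, so
  -- buckets[k] never raises and getD k [] is exact
  (PySem.List.dedup (pairs.map (fun p => p.1))).map (fun k => (k, buckets.getD k []))

-- ===== PRECONDITION & SPEC =====
def Spec_group_by_family_depth_py (pack_id : String) (skill_names : List String) (depth : Int) (out : List (String × List String)) : Prop := out = group_by_family_depth_py_alt pack_id skill_names depth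
instance (pack_id : String) (skill_names : List String) (depth : Int) (out : List (String × List String)) : Decidable (Spec_group_by_family_depth_py pack_id skill_names depth out) := by unfold Spec_group_by_family_depth_py; infer_instance

-- ===== CLAIM (what is proved, stated in full; the proofs are below) =====
def Claim_equal_group_by_family_depth_py : Prop := ∀ (pack_id : String) (skill_names : List String) (depth : Int), Dom_group_by_family_depth_py pack_id skill_names depth → Spec_group_by_family_depth_py pack_id skill_names depth (group_by_family_depth_py pack_id skill_names depth)

-- ===== LEMMAS AND PROOFS =====

theorem insertBy_of_forall_before {α : Type} (before : α → α → Bool) (x : α) (ys : List α)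
    (h : ∀ y ∈ ys, before x y = true) :
    PySem.List.insertBy before x ys = x :: ys := by
  cases ys with
  | nil => rfl
  | cons y ys => simp [PySem.List.insertBy, h y (by simp)]

-- inserting into a weakly key-sorted list commutes with filtering
theorem filter_insertBy {α κ : Type} [LinearOrder κ] (key : α → κ) (q : α → Bool) (x : α) :
    ∀ (ys : List α), ys.Pairwise (fun a c => key a ≤ key c) →
      (PySem.List.insertBy (fun a b => decide (key a < key b)) x ys).filter q
      = if q x then PySem.List.insertBy (fun a b => decide (key a < key b)) x (ys.filter q)
        else ys.filter q := by
  intro ys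
  induction ys with
  | nil => intro _; simp [PySem.List.insertBy, List.filter_singleton]
  | cons y ys ih =>
    intro hp
    rw [List.pairwise_cons] at hp
    by_cases hxy : key x < key y
    · -- x goes in front; every kept element of y :: ys has key > key x
      have hall : ∀ z ∈ (y :: ys).filter q,
          (fun a b => decide (key a < key b)) x z = true := by
        intro z hz
        have hz' := List.mem_of_mem_filter hz
        rcases List.mem_cons.mp hz' with rfl | hz''
        · simpa using hxy
        · simpa using lt_of_lt_of_le hxy (hp.1 z hz'')
      rw [show PySem.List.insertBy (fun a b => decide (key a < key b)) x (y :: ys)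
            = x :: y :: ys by simp [PySem.List.insertBy, hxy]]
      rw [insertBy_of_forall_before _ _ _ hall]
      by_cases hqx : q x <;> simp [hqx, List.filter_cons]
    · -- x is inserted further right
      rw [show PySem.List.insertBy (fun a b => decide (key a < key b)) x (y :: ys)
            = y :: PySem.List.insertBy (fun a b => decide (key a < key b)) x ys by
          simp [PySem.List.insertBy, hxy]]
      by_cases hqy : q y
      · rw [List.filter_cons_of_pos hqy, ih hp.2, List.filter_cons_of_pos hqy]
        by_cases hqx : q x
        · simp only [hqx, if_pos]
          rw [show PySem.List.insertBy (fun a b => decide (key a < key b)) x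
                (y :: ys.filter q)
                = y :: PySem.List.insertBy (fun a b => decide (key a < key b)) x
                    (ys.filter q) by simp [PySem.List.insertBy, hxy]]
        · simp [hqx]
      · rw [List.filter_cons_of_neg hqy, ih hp.2, List.filter_cons_of_neg hqy]

-- insertBy only looks at keys, so it commutes with a key-respecting projection
theorem map_insertBy {α β κ : Type} [LinearOrder κ] (key : α → κ) (f : α → β) (g : β → κ)
    (hk : ∀ a, key a = g (f a)) (x : α) (ys : List α) :
    (PySem.List.insertBy (fun a b => decide (key a < key b)) x ys).map f
    = PySem.List.insertBy (fun a b => decide (g a < g b)) (f x) (ys.map f) := by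
  induction ys with
  | nil => rfl
  | cons y ys ih =>
    by_cases h : key x < key y
    · have h' : g (f x) < g (f y) := by rw [← hk, ← hk]; exact h
      simp [PySem.List.insertBy, h, h']
    · have h' : ¬ g (f x) < g (f y) := by rw [← hk, ← hk]; exact h
      simp [PySem.List.insertBy, h, h', ih]

-- stable sort commutes with filter
theorem sorted_filter {α κ : Type} [LinearOrder κ] (key : α → κ) (q : α → Bool) (xs : List α) :
    (PySem.List.sorted xs key).filter q = PySem.List.sorted (xs.filter q) key := by
  induction xs using List.reverseRecOn with
  | nil => rfl
  | append_singleton xs x ih =>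
    rw [PySem.List.sorted_eq_foldl_insertBy (xs ++ [x]), List.foldl_append,
      ← PySem.List.sorted_eq_foldl_insertBy xs]
    simp only [List.foldl_cons, List.foldl_nil]
    rw [filter_insertBy key q x _ (PySem.List.sorted_pairwise xs key), ih, List.filter_append]
    by_cases hqx : q x
    · simp only [List.filter_singleton, hqx, cond_true]
      rw [PySem.List.sorted_eq_foldl_insertBy (xs.filter q ++ [x]), List.foldl_append,
        ← PySem.List.sorted_eq_foldl_insertBy (xs.filter q)]
      simp only [List.foldl_cons, List.foldl_nil, if_true]
    · simp [hqx]

-- stable sort commutes with a key-respecting projection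
theorem sorted_map {α β κ : Type} [LinearOrder κ] (key : α → κ) (f : α → β) (g : β → κ)
    (hk : ∀ a, key a = g (f a)) (xs : List α) :
    (PySem.List.sorted xs key).map f = PySem.List.sorted (xs.map f) g := by
  induction xs using List.reverseRecOn with
  | nil => rfl
  | append_singleton xs x ih =>
    rw [PySem.List.sorted_eq_foldl_insertBy (xs ++ [x]), List.foldl_append,
      ← PySem.List.sorted_eq_foldl_insertBy xs]
    simp only [List.foldl_cons, List.foldl_nil, List.map_append, List.map_cons, List.map_nil]
    rw [map_insertBy key f g hk, ih,
      PySem.List.sorted_eq_foldl_insertBy (xs.map f ++ [f x]), List.foldl_append,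
      ← PySem.List.sorted_eq_foldl_insertBy (xs.map f)]
    simp only [List.foldl_cons, List.foldl_nil]

-- the grouping identity behind both programs, for an arbitrary per-name key function
theorem grouping_eq (key : String → String) (ns : List String) :
    (ns.foldl (fun d n => d.modify (key n) [] (fun g => g ++ [n])) PySem.Dict.empty).items.map
        (fun p => (p.1, PySem.List.sorted p.2 (fun x => x) false))
    = (PySem.List.dedup ((ns.map (fun n => (key n, n))).map (fun p => p.1))).map (fun k =>
        (k, ((PySem.List.sorted (ns.map (fun n => (key n, n))) (fun p => p.2) false).foldl
              (fun d p => d.modify p.1 [] (fun g => g ++ [p.2])) PySem.Dict.empty).getD k [])) := by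
  have hnodup : (ns.foldl (fun d n => d.modify (key n) [] (fun g => g ++ [n]))
      PySem.Dict.empty).keys.Nodup :=
    PySem.Dict.nodup_keys_foldl_modify_key ns key [] (fun _ n g => g ++ [n])
      PySem.Dict.empty (by simp [pysem])
  have hkeys : (ns.foldl (fun d n => d.modify (key n) [] (fun g => g ++ [n]))
      PySem.Dict.empty).keys = PySem.List.dedup (ns.map key) := by
    have h := PySem.Dict.keys_foldl_modify_key ns key [] (fun _ n g => g ++ [n])
      PySem.Dict.empty
    rw [h, PySem.List.dedup_eq_ofList]; rfl
  have hfold : ns.foldl (fun d n => d.modify (key n) [] (fun g => g ++ [n])) PySem.Dict.empty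
      = (ns.map (fun n => (key n, n))).foldl
          (fun d p => d.modify p.1 [] (fun g => g ++ [p.2])) PySem.Dict.empty := by
    rw [List.foldl_map]
  have hgetA : ∀ k, (ns.foldl (fun d n => d.modify (key n) [] (fun g => g ++ [n]))
      PySem.Dict.empty).getD k []
      = ((ns.map (fun n => (key n, n))).filter (fun p => p.1 == k)).map Prod.snd := by
    intro k
    rw [hfold]
    have h := PySem.Dict.getD_foldl_modify_append (ns.map (fun n => (key n, n)))
      PySem.Dict.empty k
    rw [h]; simp [PySem.Dict.getD_empty]
  have hgetB : ∀ k, ((PySem.List.sorted (ns.map (fun n => (key n, n))) (fun p => p.2) false).foldl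
        (fun d p => d.modify p.1 [] (fun g => g ++ [p.2])) PySem.Dict.empty).getD k []
      = PySem.List.sorted (((ns.map (fun n => (key n, n))).filter
          (fun p => p.1 == k)).map Prod.snd) (fun x => x) false := by
    intro k
    have h := PySem.Dict.getD_foldl_modify_append
      (PySem.List.sorted (ns.map (fun n => (key n, n))) (fun p => p.2) false)
      PySem.Dict.empty k
    rw [h]
    rw [show (List.filter (fun p => p.1 == k)
          (PySem.List.sorted (ns.map (fun n => (key n, n))) (fun p => p.2) false))
        = PySem.List.sorted ((ns.map (fun n => (key n, n))).filter (fun p => p.1 == k))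
            (fun p => p.2) false from
      sorted_filter (fun p => p.2) (fun p => p.1 == k) (ns.map (fun n => (key n, n)))]
    rw [show (List.map (fun x => x.2)
          (PySem.List.sorted ((ns.map (fun n => (key n, n))).filter (fun p => p.1 == k))
            (fun p => p.2) false))
        = PySem.List.sorted (((ns.map (fun n => (key n, n))).filter
            (fun p => p.1 == k)).map (fun x => x.2)) (fun x => x) false from
      sorted_map (α := String × String) (β := String) (κ := String)
        (fun p => p.2) (fun x => x.2) (fun x => x) (fun _ => rfl) _]
    simp [PySem.Dict.getD_empty]
  have hk1 : (ns.map (fun n => (key n, n))).map (fun p => p.1) = ns.map key := by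
    rw [List.map_map]; rfl
  rw [hk1, PySem.Dict.items_eq_map_keys _ hnodup [], hkeys, List.map_map]
  refine List.map_congr_left ?_
  intro k _
  simp only [Function.comp, hgetA k, hgetB k]

-- ===== VERDICT (by name: the statement is the Claim_ definition above) =====
theorem group_by_family_depth_py_spec : Claim_equal_group_by_family_depth_py := by
  intro pack_id skill_names depth _
  unfold Spec_group_by_family_depth_py
  simp only [group_by_family_depth_py, group_by_family_depth_py_alt]
  exact grouping_eq (fun n => familyKey_py pack_id n depth) skill_names
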